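-- pv_equiv track=rewrite | github.com/NAN-Xiao/excel-graph-builder | indexer/discovery/naming_convention.py | _build_prefix_table_index
-- ===== SOURCE A (Python) =====
-- from typing import List, Dict, Optional, Tuple, Set
--
-- def _build_prefix_table_index(table_names: Set[str]) -> Dict[str, str]:
--     """
--     构建 prefix → 最短实际表名 索引，用于模糊匹配。
--     例: 'skill' → 'skill' (如果存在), 否则 'skill' → 'skill_base' (最短前缀匹配)
--     """
--     index: Dict[str, List[str]] = {}
--     for name in table_names:
--         parts = name.lower().split('_')
--         # 用第一个有意义的词段作为 prefix key
--         if parts: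
--             stem = parts[0]
--             if len(stem) >= 3:
--                 index.setdefault(stem, []).append(name)
--     # 每个 stem 保留最短表名（更可能是基础实体表）
--     result: Dict[str, str] = {}
--     for stem, names in index.items():
--         names.sort(key=len)
--         result[stem] = names[0]
--     return result
-- ===== SOURCE B (Python) =====
-- from typing import Dict, Set
--
-- def _build_prefix_table_index(table_names: Set[str]) -> Dict[str, str]:
--     result: Dict[str, str] = {}
--     for name in table_names:
--         stem = name.lower().split('_')[0]
--         if len(stem) < 3:
--             continue
--         cur = result.get(stem)
--         if cur is None or len(name) < len(cur):
--             result[stem] = name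
--     return result
-- ===== Notes on version B (the rewrite author's own statement) =====
-- stated objective: simpler
-- what changed: Single pass maintaining the stem->shortest-name dict directly (strict-< keeps the first-seen name on ties), instead of grouping names into per-stem lists and then stable-sorting each group by length to take its first element.
import Mathlib
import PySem

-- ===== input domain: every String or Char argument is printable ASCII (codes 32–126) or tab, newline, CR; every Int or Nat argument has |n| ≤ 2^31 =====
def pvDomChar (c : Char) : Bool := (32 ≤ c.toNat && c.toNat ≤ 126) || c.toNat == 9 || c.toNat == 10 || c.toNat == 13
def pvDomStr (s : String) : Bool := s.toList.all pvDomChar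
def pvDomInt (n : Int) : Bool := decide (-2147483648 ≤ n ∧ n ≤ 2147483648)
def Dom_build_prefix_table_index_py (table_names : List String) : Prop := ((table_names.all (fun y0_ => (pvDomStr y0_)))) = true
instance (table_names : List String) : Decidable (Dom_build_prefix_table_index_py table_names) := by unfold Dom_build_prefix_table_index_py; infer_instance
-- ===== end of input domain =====

-- B replaces A's two-phase build (group names into per-stem lists, then sort each group by
-- length and take the first) by a single pass that keeps the shortest name per stem directly;
-- strict '<' preserves A's stable-sort tie-breaking (first encountered wins).

-- ===== PORT A =====
-- A-side helper: the body of A's first loop (group names by their first lowered '_'-segment).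
-- 'index.setdefault(stem, []).append(name)' is Dict.modify stem [] (· ++ [name]);
-- 'parts[0]' is taken under the 'if parts:' guard, so headD "" is exact there.
def pvStepA (d : PySem.Dict String (List String)) (name : String) : PySem.Dict String (List String) :=
  let parts := (PySem.Str.split? (PySem.Str.lower name) "_").getD []
  if parts ≠ [] then
    let stem := parts.headD ""
    if 3 ≤ PySem.Str.len stem then d.modify stem [] (· ++ [name]) else d
  else d

def build_prefix_table_index_py (table_names : List String) : List (String × String) :=
  -- index = first loop; second loop: names.sort(key=len); result[stem] = names[0]
  -- ('names' is never empty, so headD "" is exact for names[0])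
  ((table_names.foldl pvStepA PySem.Dict.empty).items.foldl
      (fun r p => r.insert p.1 ((PySem.List.sorted p.2 (fun s => PySem.Str.len s) false).headD ""))
      PySem.Dict.empty).items

-- ===== PORT B =====
-- B-side helper: the body of B's single loop.
def pvStepB (r : PySem.Dict String String) (name : String) : PySem.Dict String String :=
  let stem := ((PySem.Str.split? (PySem.Str.lower name) "_").getD []).headD ""
  if PySem.Str.len stem < 3 then r
  else
    match r.get? stem with
    | none => r.insert stem name
    | some cur => if PySem.Str.len name < PySem.Str.len cur then r.insert stem name else r

def build_prefix_table_index_py_alt (table_names : List String) : List (String × String) :=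
  (table_names.foldl pvStepB PySem.Dict.empty).items

-- ===== PRECONDITION & SPEC =====
def Spec_build_prefix_table_index_py (table_names : List String) (out : List (String × String)) : Prop := out = build_prefix_table_index_py_alt table_names
instance (table_names : List String) (out : List (String × String)) : Decidable (Spec_build_prefix_table_index_py table_names out) := by unfold Spec_build_prefix_table_index_py; infer_instance

-- ===== CLAIM (what is proved, stated in full; the proofs are below) =====
def Claim_equal_build_prefix_table_index_py : Prop := ∀ (table_names : List String), Dom_build_prefix_table_index_py table_names → Spec_build_prefix_table_index_py table_names (build_prefix_table_index_py table_names)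

-- ===== LEMMAS AND PROOFS =====

-- first element of minimal length (what B maintains per stem)
def minF (ns : List String) : String :=
  match ns with
  | [] => ""
  | a :: t => t.foldl (fun acc x => if PySem.Str.len x < PySem.Str.len acc then x else acc) a

lemma minF_append (a : String) (t : List String) (x : String) :
    minF ((a :: t) ++ [x]) =
      if PySem.Str.len x < PySem.Str.len (minF (a :: t)) then x else minF (a :: t) := by
  simp [minF, List.foldl_append]

lemma minF_append' (a : String) (t : List String) (x : String) :
    minF (a :: (t ++ [x])) =
      if PySem.Str.len x < PySem.Str.len (minF (a :: t)) then x else minF (a :: t) := by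
  simp [minF, List.foldl_append]

lemma sorted_headD (ns : List String) :
    (PySem.List.sorted ns (fun s => PySem.Str.len s) false).headD "" = minF ns := by
  induction ns using List.reverseRecOn with
  | nil => rfl
  | append_singleton ns x ih =>
    rw [PySem.List.sorted_eq_foldl_insertBy] at ih ⊢
    rw [List.foldl_append]
    cases h : List.foldl
        (fun acc x => PySem.List.insertBy (fun a b => decide (PySem.Str.len a < PySem.Str.len b)) x acc)
        [] ns with
    | nil =>
      have h' : PySem.List.sorted ns (fun s => PySem.Str.len s) false = [] := by
        rw [PySem.List.sorted_eq_foldl_insertBy]; exact h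
      have hns : ns = [] := (PySem.List.sorted_eq_nil_iff _ _ _).mp h'
      subst hns
      simp [PySem.List.insertBy, minF]
    | cons m t =>
      rw [h] at ih
      have hm : m = minF ns := by simpa using ih
      have hns : ns ≠ [] := by
        intro e; subst e; simp at h
      obtain ⟨a, t', rfl⟩ := List.exists_cons_of_ne_nil hns
      simp only [List.foldl_cons, List.foldl_nil]
      rw [minF_append, ← hm]
      simp [PySem.List.insertBy]
      split_ifs <;> simp

-- lookup through the item-wise image
lemma find?_map_minF (l : List (String × List String)) (k : String) :
    List.find? (fun p => p.1 == k) (l.map (fun p => (p.1, minF p.2))) =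
      Option.map (fun p => (p.1, minF p.2)) (List.find? (fun p => p.1 == k) l) := by
  induction l with
  | nil => rfl
  | cons p l ih => by_cases h : p.1 == k <;> simp [h, ih]

lemma get?_of_rel {d : PySem.Dict String (List String)} {r : PySem.Dict String String}
    (h : r.items = d.items.map (fun p => (p.1, minF p.2))) (k : String) :
    r.get? k = Option.map minF (d.get? k) := by
  simp only [PySem.Dict.get?, h, find?_map_minF, Option.map_map]
  cases List.find? (fun p => p.1 == k) d.items with
  | none => rfl
  | some p => rfl

lemma keys_of_rel {d : PySem.Dict String (List String)} {r : PySem.Dict String String}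
    (h : r.items = d.items.map (fun p => (p.1, minF p.2))) :
    r.keys = d.keys := by
  simp only [PySem.Dict.keys, h, List.map_map]
  rfl

lemma contains_of_rel {d : PySem.Dict String (List String)} {r : PySem.Dict String String}
    (h : r.items = d.items.map (fun p => (p.1, minF p.2))) (k : String) :
    r.contains k = d.contains k := by
  rw [PySem.Dict.contains_eq_decide_mem_keys, PySem.Dict.contains_eq_decide_mem_keys, keys_of_rel h]

def pvInv (d : PySem.Dict String (List String)) (r : PySem.Dict String String) : Prop :=
  d.keys.Nodup ∧ (∀ p ∈ d.items, p.2 ≠ []) ∧ r.items = d.items.map (fun p => (p.1, minF p.2))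

lemma step_rel (d : PySem.Dict String (List String)) (r : PySem.Dict String String)
    (hI : pvInv d r) (name : String) : pvInv (pvStepA d name) (pvStepB r name) := by
  obtain ⟨hnd, hne, h⟩ := hI
  cases hp : (PySem.Str.split? (PySem.Str.lower name) "_").getD [] with
  | nil =>
    have hA : pvStepA d name = d := by simp [pvStepA, hp]
    have hB : pvStepB r name = r := by simp [pvStepB, hp, PySem.Str.len]
    rw [hA, hB]; exact ⟨hnd, hne, h⟩
  | cons s0 rest =>
    by_cases h3 : 3 ≤ PySem.Str.len s0
    case neg =>
      have hA : pvStepA d name = d := by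
        simp only [pvStepA, hp]
        rw [if_pos (by simp)]
        simp only [List.headD_cons]
        rw [if_neg h3]
      have hB : pvStepB r name = r := by
        simp only [pvStepB, hp, List.headD_cons]
        rw [if_pos (by omega)]
      rw [hA, hB]; exact ⟨hnd, hne, h⟩
    case pos =>
    have hA : pvStepA d name = d.modify s0 [] (· ++ [name]) := by
      simp only [pvStepA, hp]
      rw [if_pos (by simp)]
      simp only [List.headD_cons]
      rw [if_pos h3]
    have hB : pvStepB r name =
        (match r.get? s0 with
         | none => r.insert s0 name
         | some cur => if PySem.Str.len name < PySem.Str.len cur then r.insert s0 name else r) := by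
      simp only [pvStepB, hp, List.headD_cons]
      rw [if_neg (by omega)]
    rw [hA, hB, get?_of_rel h]
    by_cases hc : d.contains s0 = true
    · -- s0 present: A appends to its list, B keeps/improves the running shortest
      obtain ⟨ns, hns⟩ : ∃ ns, d.get? s0 = some ns := by
        rw [PySem.Dict.contains_eq_isSome_get?] at hc
        exact Option.isSome_iff_exists.mp hc
      have hmem : (s0, ns) ∈ d.items := PySem.Dict.mem_items_of_get?_eq_some d hns
      have hnsne : ns ≠ [] := hne _ hmem
      obtain ⟨a, t, rfl⟩ := List.exists_cons_of_ne_nil hnsne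
      have hgetD : d.getD s0 [] = a :: t := PySem.Dict.getD_of_get?_eq_some d [] hns
      have hAitems : (PySem.Dict.modify d s0 [] (· ++ [name])).items =
          d.items.map (fun p => if p.1 == s0 then (s0, (a :: t) ++ [name]) else p) := by
        rw [PySem.Dict.modify, hgetD, PySem.Dict.items_insert_of_contains d _ hc]
      have hAkeys : (PySem.Dict.modify d s0 [] (· ++ [name])).keys = d.keys := by
        rw [PySem.Dict.modify, PySem.Dict.keys_insert_of_contains d _ hc]
      have huniq : ∀ p ∈ d.items, p.1 = s0 → p.2 = a :: t := by
        intro p hpmem hp1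
        have hg := PySem.Dict.get?_of_mem_items d (k := p.1) (v := p.2) (by exact hpmem) hnd
        rw [hp1, hns] at hg
        exact Option.some_injective _ hg.symm
      refine ⟨by rw [hAkeys]; exact hnd, ?_, ?_⟩
      · intro p hpmem
        rw [hAitems] at hpmem
        obtain ⟨q, hq, hqe⟩ := List.mem_map.mp hpmem
        by_cases hq1 : q.1 == s0 <;> simp [hq1] at hqe <;> subst hqe
        · simp
        · exact hne _ hq
      · rw [hns]
        simp only [Option.map_some]
        by_cases hlt : PySem.Str.len name < PySem.Str.len (minF (a :: t))
        · -- B overwrites: both sides rewrite exactly the s0 entries to the new minimum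
          rw [if_pos hlt]
          have hrc : r.contains s0 = d.contains s0 := contains_of_rel h s0
          rw [PySem.Dict.insert, if_pos (by rw [hrc]; exact hc), hAitems, h,
            List.map_map, List.map_map]
          apply List.map_congr_left
          intro p _
          have hmin : minF (a :: (t ++ [name])) = name := by
            rw [minF_append', if_pos hlt]
          by_cases hp1 : p.1 == s0 <;> simp [Function.comp, hp1, hmin]
        · -- B keeps r: the s0 entry's first minimum is unchanged by the append
          rw [if_neg hlt, hAitems, h, List.map_map]
          symm
          apply List.map_congr_left
          intro p hpmem
          by_cases hp1 : p.1 == s0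
          · have hp2 : p.2 = a :: t := huniq p hpmem (by exact eq_of_beq hp1)
            have hp1' : p.1 = s0 := eq_of_beq hp1
            have hmin : minF (a :: (t ++ [name])) = minF (a :: t) := by
              rw [minF_append', if_neg hlt]
            simp [Function.comp, hp1', hp2, hmin]
          · simp [Function.comp, hp1]
    · -- fresh s0: both sides append a new entry
      have hcf : d.contains s0 = false := by simpa using hc
      have hget : d.get? s0 = none := (PySem.Dict.get?_eq_none_iff_contains d s0).mpr hcf
      have hgetD : d.getD s0 [] = [] := PySem.Dict.getD_of_not_contains d [] hcf
      have hAitems : (PySem.Dict.modify d s0 [] (· ++ [name])).items =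
          d.items ++ [(s0, [name])] := by
        rw [PySem.Dict.modify, hgetD, PySem.Dict.items_insert_of_not_contains d _ hcf]
        rfl
      have hrc : r.contains s0 = false := by rw [contains_of_rel h]; exact hcf
      refine ⟨?_, ?_, ?_⟩
      · rw [PySem.Dict.modify, hgetD, PySem.Dict.keys_insert_of_not_contains d _ hcf]
        refine List.Nodup.append hnd (List.nodup_singleton _) ?_
        intro x hx hx'
        rw [List.mem_singleton] at hx'
        rw [hx'] at hx
        have hnot : s0 ∉ d.keys := by
          simpa [PySem.Dict.contains_eq_decide_mem_keys] using hcf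
        exact hnot hx
      · intro p hpmem
        rw [hAitems, List.mem_append] at hpmem
        rcases hpmem with hpmem | hpmem
        · exact hne _ hpmem
        · rw [List.mem_singleton] at hpmem; subst hpmem; simp
      · rw [hget]
        simp only [Option.map_none]
        rw [PySem.Dict.insert, if_neg (by simp [hrc]), hAitems, h]
        simp [minF]

lemma fold_rel (l : List String) (d : PySem.Dict String (List String)) (r : PySem.Dict String String)
    (hI : pvInv d r) : pvInv (l.foldl pvStepA d) (l.foldl pvStepB r) := by
  induction l generalizing d r with
  | nil => exact hI
  | cons x l ih =>
    rw [List.foldl_cons, List.foldl_cons]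
    exact ih _ _ (step_rel d r hI x)

-- ===== VERDICT (by name: the statement is the Claim_ definition above) =====
theorem build_prefix_table_index_py_spec : Claim_equal_build_prefix_table_index_py := by
  intro table_names _
  unfold Spec_build_prefix_table_index_py build_prefix_table_index_py build_prefix_table_index_py_alt
  have hbase : pvInv PySem.Dict.empty PySem.Dict.empty := by
    refine ⟨List.nodup_nil, ?_, rfl⟩
    intro p hp
    cases hp
  have hI := fold_rel table_names _ _ hbase
  obtain ⟨hnd, -, h⟩ := hI
  have hfresh := PySem.Dict.items_foldl_insert_fresh
    (table_names.foldl pvStepA PySem.Dict.empty).items (fun p => p.1)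
    (fun p => (PySem.List.sorted p.2 (fun s => PySem.Str.len s) false).headD "")
    PySem.Dict.empty (fun a _ => PySem.Dict.contains_empty a.1) hnd
  rw [hfresh, h]
  show [] ++ _ = _
  rw [List.nil_append]
  apply List.map_congr_left
  intro p _
  show (p.1, (PySem.List.sorted p.2 (fun s => PySem.Str.len s) false).headD "") = (p.1, minF p.2)
  rw [sorted_headD]
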